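-- pv_equiv track=rewrite | github.com/brunodeathayde/Pesquisa-Operacional-II | Metaheuristics/Genetic Algorithms/Lot sizing/balance_heuristic.py | balance_heuristic
-- ===== SOURCE A (Python) =====
-- def balance_heuristic(d, p, f, h):
--     """
--     Heurística de Balanço por Partes (BP) corrigida.
--     Produz em um período para cobrir demandas futuras se o custo de estocagem for menor que o custo fixo de produção adicional.
--
--     Parâmetros:
--     - d: demanda por período
--     - p: custo unitário de produção por período
--     - f: custo fixo de produção por período
--     - h: custo unitário de estocagem por período
--
--     Retorna:
--     - x: produção por período
--     - s: estoque ao final de cada período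
--     - y: indicador binário de produção
--     - custo_total: custo total da solução
--     """
--     n = len(d)
--     x = [0] * n
--     s = [0] * n
--     y = [0] * n
--
--     t = 1
--     while t < n:
--         total_demand = d[t]
--         total_holding = 0
--         t_final = t
--
--         for j in range(t + 1, n):
--             total_holding += h[j] * sum(d[k] for k in range(t, j))
--             if total_holding < f[j]:
--                 total_demand += d[j]
--                 t_final = j
--             else:
--                 break
--
--         x[t] = total_demand
--         y[t] = 1
--
--         # Atualiza estoques
--         estoque = total_demand
--         for j in range(t, t_final + 1):
--             estoque -= d[j]
--             s[j] = max(estoque, 0)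
--
--         t = t_final + 1
--
--     custo_total = sum(p[t] * x[t] + f[t] * y[t] + h[t] * s[t] for t in range(1, n))
--     return x, s, y, custo_total
-- ===== SOURCE B (Python) =====
-- def balance_heuristic(d, p, f, h):
--     """Prefix-sum + block-decomposition rewrite: compute the production blocks
--     first, then assemble x, s, y from the block list with closed-form
--     inventory values D[tf+1]-D[j+1] instead of re-summing demand windows and
--     patching preallocated arrays."""
--     n = len(d)
--     if n == 0:
--         return [], [], [], 0
--     # D[i] = d[0] + ... + d[i-1]
--     D = [0]
--     run = 0
--     for v in d:
--         run += v
--         D.append(run)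
--     # block decomposition of periods 1..n-1
--     blocks = []
--     t = 1
--     while t < n:
--         hold = 0
--         j = t + 1
--         while j < n:
--             hold += h[j] * (D[j] - D[t])
--             if hold < f[j]:
--                 j += 1
--             else:
--                 break
--         blocks.append((t, j - 1))
--         t = j
--     x = [0] + [D[tf + 1] - D[t] if j == t else 0 for (t, tf) in blocks for j in range(t, tf + 1)]
--     y = [0] + [1 if j == t else 0 for (t, tf) in blocks for j in range(t, tf + 1)]
--     s = [0] + [max(D[tf + 1] - D[j + 1], 0) for (t, tf) in blocks for j in range(t, tf + 1)]
--     cost = sum(p[t] * x[t] + f[t] * y[t] + h[t] * s[t] for t in range(1, n))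
--     return x, s, y, cost
-- ===== Notes on version B (the rewrite author's own statement) =====
-- stated objective: faster
-- what changed: A re-sums d[t..j-1] from scratch at every inner step and patches preallocated arrays in place; B precomputes one prefix-sum array, first derives the list of production blocks, then assembles x, y, s by comprehensions over the blocks with closed-form inventory values D[tf+1]-D[j+1].
import Mathlib
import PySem

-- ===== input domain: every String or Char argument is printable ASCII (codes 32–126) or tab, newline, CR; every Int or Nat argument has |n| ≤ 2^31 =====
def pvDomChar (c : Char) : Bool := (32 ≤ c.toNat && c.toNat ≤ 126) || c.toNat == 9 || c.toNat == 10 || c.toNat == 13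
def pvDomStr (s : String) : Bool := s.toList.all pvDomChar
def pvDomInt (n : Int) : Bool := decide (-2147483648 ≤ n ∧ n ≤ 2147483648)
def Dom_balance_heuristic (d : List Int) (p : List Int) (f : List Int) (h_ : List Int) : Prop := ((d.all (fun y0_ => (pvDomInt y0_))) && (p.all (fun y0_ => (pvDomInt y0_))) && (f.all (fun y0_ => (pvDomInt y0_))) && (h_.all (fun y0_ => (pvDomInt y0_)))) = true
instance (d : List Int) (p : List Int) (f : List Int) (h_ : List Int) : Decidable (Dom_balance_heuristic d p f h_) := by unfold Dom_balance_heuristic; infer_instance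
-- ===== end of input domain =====

-- B replaces A's per-step re-summation and in-place array patching by one prefix-sum
-- array, an explicit block decomposition, and comprehension-style assembly of x, y, s
-- from the block list (objective: faster).
-- Loops are ported as structural recursion on a fuel argument that is always large
-- enough for the loop bounds; fuel is only a totality guard, never a size cap.

-- ===== PORT A =====
-- sum(d[k] for k in range(t, j)); indices t..j-1 are nonnegative and (under Pre_) in range
def pvSumD (d : List Int) (t j : Nat) : Int :=
  ((PySem.List.pyRange (t : Int) (j : Int) 1).map (fun k => PySem.List.pyGetD d k 0)).sum

-- the inner 'for j in range(t+1, n)' with break; d[j], f[j], h[j] via pyGetD (in range under Pre_)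
def pvInnerA (d f h_ : List Int) (n t : Nat) : Nat → Nat → Int → Int → Nat → Int × Nat
  | 0, _, dem, _, tf => (dem, tf)
  | fuel + 1, j, dem, hold, tf =>
    if j < n then
      let hold' := hold + PySem.List.pyGetD h_ (j : Int) 0 * pvSumD d t j
      if hold' < PySem.List.pyGetD f (j : Int) 0 then
        pvInnerA d f h_ n t fuel (j + 1) (dem + PySem.List.pyGetD d (j : Int) 0) hold' j
      else (dem, tf)
    else (dem, tf)

-- 'for j in range(t, t_final+1): estoque -= d[j]; s[j] = max(estoque, 0)'
def pvStockA (d : List Int) (tf : Nat) : Nat → Nat → Int → List Int → List Int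
  | 0, _, _, s => s
  | fuel + 1, j, est, s =>
    if j ≤ tf then
      let est' := est - PySem.List.pyGetD d (j : Int) 0
      pvStockA d tf fuel (j + 1) est' (s.set j (max est' 0))
    else s

-- the outer 'while t < n' loop of A
def pvOuterA (d p f h_ : List Int) (n : Nat) : Nat → Nat → List Int → List Int → List Int → List Int × List Int × List Int
  | 0, _, x, s, y => (x, s, y)
  | fuel + 1, t, x, s, y =>
    if t < n then
      let r := pvInnerA d f h_ n t n (t + 1) (PySem.List.pyGetD d (t : Int) 0) 0 t
      pvOuterA d p f h_ n fuel (r.2 + 1) (x.set t r.1) (pvStockA d r.2 (r.2 + 1) t r.1 s) (y.set t 1)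
    else (x, s, y)

-- sum(p[t]*x[t] + f[t]*y[t] + h[t]*s[t] for t in range(1, n)) — identical line in A and B
def pvCost (p f h_ x s y : List Int) (n : Nat) : Int :=
  ((PySem.List.pyRange 1 (n : Int) 1).map (fun t =>
    PySem.List.pyGetD p t 0 * PySem.List.pyGetD x t 0 +
    PySem.List.pyGetD f t 0 * PySem.List.pyGetD y t 0 +
    PySem.List.pyGetD h_ t 0 * PySem.List.pyGetD s t 0)).sum

def balance_heuristic (d : List Int) (p : List Int) (f : List Int) (h_ : List Int) :
    List Int × List Int × List Int × Int :=
  let n := d.length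
  let r := pvOuterA d p f h_ n n 1 (List.replicate n 0) (List.replicate n 0) (List.replicate n 0)
  (r.1, r.2.1, r.2.2, pvCost p f h_ r.1 r.2.1 r.2.2 n)

-- ===== PORT B =====
-- 'D = [0]; run = 0; for v in d: run += v; D.append(run)' — the prefix-sum array
def pvPref (d : List Int) : List Int :=
  (d.foldl (fun (st : List Int × Int) v => (st.1 ++ [st.2 + v], st.2 + v)) ([0], 0)).1

-- B's inner 'while j < n: hold += h[j]*(D[j]-D[t]); if hold < f[j]: j += 1 else: break'
def pvFindJ (D f h_ : List Int) (n t : Nat) : Nat → Nat → Int → Nat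
  | 0, j, _ => j
  | fuel + 1, j, hold =>
    if j < n then
      let hold' := hold + h_.getD j 0 * (D.getD j 0 - D.getD t 0)
      if hold' < f.getD j 0 then pvFindJ D f h_ n t fuel (j + 1) hold'
      else j
    else j

-- B's outer 'while t < n: blocks.append((t, j-1)); t = j'
def pvBlocks (D f h_ : List Int) (n : Nat) : Nat → Nat → List (Nat × Nat) → List (Nat × Nat)
  | 0, _, acc => acc
  | fuel + 1, t, acc =>
    if t < n then
      let j := pvFindJ D f h_ n t n (t + 1) 0
      pvBlocks D f h_ n fuel j (acc ++ [(t, j - 1)])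
    else acc

-- the three block comprehensions of B, one helper per comprehension body
def pvXRow (D : List Int) (b : Nat × Nat) : List Int :=
  (List.range' b.1 (b.2 + 1 - b.1)).map (fun j => if j = b.1 then D.getD (b.2 + 1) 0 - D.getD b.1 0 else 0)
def pvYRow (b : Nat × Nat) : List Int :=
  (List.range' b.1 (b.2 + 1 - b.1)).map (fun j => if j = b.1 then (1 : Int) else 0)
def pvSRow (D : List Int) (b : Nat × Nat) : List Int :=
  (List.range' b.1 (b.2 + 1 - b.1)).map (fun j => max (D.getD (b.2 + 1) 0 - D.getD (j + 1) 0) 0)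

def balance_heuristic_alt (d : List Int) (p : List Int) (f : List Int) (h_ : List Int) :
    List Int × List Int × List Int × Int :=
  let n := d.length
  if n = 0 then ([], [], [], 0)
  else
    let D := pvPref d
    let blocks := pvBlocks D f h_ n n 1 []
    let x := 0 :: blocks.flatMap (pvXRow D)
    let y := 0 :: blocks.flatMap pvYRow
    let s := 0 :: blocks.flatMap (pvSRow D)
    (x, s, y, pvCost p f h_ x s y n)

-- ===== PRECONDITION & SPEC =====
-- Pre_ excludes exactly the inputs on which the Python A raises IndexError:
-- with at least two periods it indexes p, f and h up to index len(d)-1.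
def Pre_balance_heuristic (d : List Int) (p : List Int) (f : List Int) (h_ : List Int) : Prop :=
  d.length ≤ 1 ∨ (d.length ≤ p.length ∧ d.length ≤ f.length ∧ d.length ≤ h_.length)
instance (d : List Int) (p : List Int) (f : List Int) (h_ : List Int) : Decidable (Pre_balance_heuristic d p f h_) := by unfold Pre_balance_heuristic; infer_instance

def pvWitness_balance_heuristic : List Int × List Int × List Int × List Int :=
  ([3, 4, 2, 5], [1, 1, 1, 1], [5, 5, 5, 5], [1, 1, 1, 1])

def Spec_balance_heuristic (d : List Int) (p : List Int) (f : List Int) (h_ : List Int) (out : List Int × List Int × List Int × Int) : Prop := out = balance_heuristic_alt d p f h_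
instance (d : List Int) (p : List Int) (f : List Int) (h_ : List Int) (out : List Int × List Int × List Int × Int) : Decidable (Spec_balance_heuristic d p f h_ out) := by unfold Spec_balance_heuristic; infer_instance

-- ===== CLAIM (what is proved, stated in full; the proofs are below) =====
def Claim_equal_balance_heuristic : Prop := ∀ (d : List Int) (p : List Int) (f : List Int) (h_ : List Int), Dom_balance_heuristic d p f h_ → Pre_balance_heuristic d p f h_ → Spec_balance_heuristic d p f h_ (balance_heuristic d p f h_)

-- ===== LEMMAS AND PROOFS =====

theorem pvSumD_succ (d : List Int) (t j : Nat) (h : t ≤ j) :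
    pvSumD d t (j + 1) = pvSumD d t j + PySem.List.pyGetD d (j : Int) 0 := by
  unfold pvSumD
  have hcast : ((j + 1 : Nat) : Int) = (j : Int) + 1 := by push_cast; ring
  rw [hcast, PySem.List.pyRange_one_succ_right (by exact_mod_cast h)]
  simp

theorem pvSumD_single (d : List Int) (t : Nat) :
    pvSumD d t (t + 1) = PySem.List.pyGetD d (t : Int) 0 := by
  unfold pvSumD
  have hcast : ((t + 1 : Nat) : Int) = (t : Int) + 1 := by push_cast; ring
  rw [hcast, PySem.List.pyRange_one_singleton]
  simp

theorem pvSumD_cons (d : List Int) (j K : Nat) (h : j < K) :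
    pvSumD d j K = PySem.List.pyGetD d (j : Int) 0 + pvSumD d (j + 1) K := by
  unfold pvSumD
  rw [PySem.List.pyRange_one_cons (by exact_mod_cast h)]
  have hcast : (j : Int) + 1 = ((j + 1 : Nat) : Int) := by push_cast; ring
  rw [hcast]
  simp

theorem pvTake_sum_succ (d : List Int) (j : Nat) :
    (d.take (j + 1)).sum = (d.take j).sum + d.getD j 0 := by
  rw [List.take_add_one, List.sum_append]
  congr 1
  rw [List.getD_eq_getElem?_getD]
  cases d[j]? <;> simp

theorem pvSumD_take (d : List Int) (t : Nat) :
    ∀ j : Nat, t ≤ j → pvSumD d t j = (d.take j).sum - (d.take t).sum := by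
  intro j
  induction j with
  | zero =>
    intro ht
    have : t = 0 := by omega
    subst this
    unfold pvSumD
    rw [PySem.List.pyRange_one_eq_nil (by omega)]
    simp
  | succ j ih =>
    intro ht
    by_cases htj : t ≤ j
    · rw [pvSumD_succ d t j htj, ih htj, pvTake_sum_succ, PySem.List.pyGetD_natCast]
      ring
    · have : t = j + 1 := by omega
      subst this
      unfold pvSumD
      rw [PySem.List.pyRange_one_eq_nil (by omega)]
      simp

-- characterisation of the prefix-sum fold
theorem pvPref_foldl (d : List Int) : ∀ (D : List Int) (r : Int),
    d.foldl (fun (st : List Int × Int) v => (st.1 ++ [st.2 + v], st.2 + v)) (D, r)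
      = (D ++ (List.range d.length).map (fun i => r + (d.take (i + 1)).sum), r + d.sum) := by
  induction d with
  | nil => intro D r; simp
  | cons v d ih =>
    intro D r
    rw [List.foldl_cons, ih (D ++ [r + v]) (r + v)]
    refine Prod.ext ?_ (by simp; ring)
    simp only [List.length_cons, List.range_succ_eq_map, List.map_cons, List.map_map]
    simp [Function.comp, List.take_succ_cons, add_assoc]

theorem pvPref_getD (d : List Int) (i : Nat) (hi : i ≤ d.length) :
    (pvPref d).getD i 0 = (d.take i).sum := by
  unfold pvPref
  rw [pvPref_foldl]
  simp only
  cases i with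
  | zero => simp
  | succ k =>
    have hk : k < d.length := by omega
    rw [List.getD_eq_getElem?_getD]
    rw [List.getElem?_append_right (by simp)]
    simp [hk]

-- the inner loops agree: A's re-summed window and accumulator equal B's D-differences
theorem pvInner_eq (d f h_ : List Int) (n t : Nat) (hn : n = d.length) (htn : t ≤ n) :
    ∀ (fuel j : Nat) (hold : Int), t ≤ j →
    pvInnerA d f h_ n t fuel j (pvSumD d t j) hold (j - 1)
      = (pvSumD d t (pvFindJ (pvPref d) f h_ n t fuel j hold),
         pvFindJ (pvPref d) f h_ n t fuel j hold - 1) := by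
  intro fuel
  induction fuel with
  | zero => intro j hold _; rfl
  | succ fuel ih =>
    intro j hold htj
    rw [pvInnerA, pvFindJ]
    by_cases hj : j < n
    · rw [if_pos hj, if_pos hj]
      simp only
      have hD : (pvPref d).getD j 0 - (pvPref d).getD t 0 = pvSumD d t j := by
        rw [pvPref_getD d j (by omega), pvPref_getD d t (by omega), pvSumD_take d t j htj]
      have hh : PySem.List.pyGetD h_ (j : Int) 0 = h_.getD j 0 := by simp
      have hf : PySem.List.pyGetD f (j : Int) 0 = f.getD j 0 := by simp
      rw [hD, hh, hf]
      by_cases hlt : hold + h_.getD j 0 * pvSumD d t j < f.getD j 0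
      · rw [if_pos hlt, if_pos hlt]
        have h2 : pvSumD d t j + PySem.List.pyGetD d (j : Int) 0 = pvSumD d t (j + 1) :=
          (pvSumD_succ d t j htj).symm
        have := ih (j + 1) (hold + h_.getD j 0 * pvSumD d t j) (by omega)
        rw [h2]
        simpa using this
      · rw [if_neg hlt, if_neg hlt]
    · rw [if_neg hj, if_neg hj]

theorem pvFindJ_bounds (D f h_ : List Int) (n t : Nat) :
    ∀ (fuel j : Nat) (hold : Int), j ≤ n →
    j ≤ pvFindJ D f h_ n t fuel j hold ∧ pvFindJ D f h_ n t fuel j hold ≤ n := by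
  intro fuel
  induction fuel with
  | zero => intro j hold hj; rw [pvFindJ]; omega
  | succ fuel ih =>
    intro j hold hj
    rw [pvFindJ]
    by_cases hjn : j < n
    · rw [if_pos hjn]
      by_cases hlt : hold + h_.getD j 0 * (D.getD j 0 - D.getD t 0) < f.getD j 0
      · rw [if_pos hlt]
        have := ih (j + 1) (hold + h_.getD j 0 * (D.getD j 0 - D.getD t 0)) (by omega)
        omega
      · rw [if_neg hlt]; omega
    · rw [if_neg hjn]; omega

-- A's stock loop produces exactly the closed-form values max(sum d[k+1..tf], 0)
theorem pvStock_eq (d : List Int) (tf : Nat) :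
    ∀ (fuel j m : Nat) (acc : List Int),
    tf + 1 - j ≤ fuel → acc.length = j → tf < j + m →
    pvStockA d tf fuel j (pvSumD d j (tf + 1)) (acc ++ List.replicate m 0)
      = (acc ++ (List.range' j (tf + 1 - j)).map (fun k => max (pvSumD d (k + 1) (tf + 1)) 0))
          ++ List.replicate (m - (tf + 1 - j)) 0 := by
  intro fuel
  induction fuel with
  | zero =>
    intro j m acc hf hlen hm
    have h0 : tf + 1 - j = 0 := by omega
    rw [pvStockA, h0]
    simp
  | succ fuel ih =>
    intro j m acc hf hlen hm
    by_cases hj : j ≤ tf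
    · rw [pvStockA, if_pos hj]
      simp only
      have hest : pvSumD d j (tf + 1) - PySem.List.pyGetD d (j : Int) 0
          = pvSumD d (j + 1) (tf + 1) := by
        rw [pvSumD_cons d j (tf + 1) (by omega)]; ring
      rw [hest]
      have hm1 : 1 ≤ m := by omega
      have hset : (acc ++ List.replicate m 0).set j (max (pvSumD d (j + 1) (tf + 1)) 0)
          = (acc ++ [max (pvSumD d (j + 1) (tf + 1)) 0]) ++ List.replicate (m - 1) 0 := by
        rw [List.set_append_right _ _ (by omega : acc.length ≤ j)]
        have hz : j - acc.length = 0 := by omega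
        rw [hz]
        cases m with
        | zero => omega
        | succ m' => simp [List.replicate_succ]
      rw [hset, ih (j + 1) (m - 1) _ (by omega) (by simp [hlen]) (by omega)]
      have hr : tf + 1 - j = (tf - j) + 1 := by omega
      rw [hr, List.range'_succ, List.map_cons]
      have hc : m - 1 - (tf + 1 - (j + 1)) = m - ((tf - j) + 1) := by omega
      rw [hc]
      have ht : tf + 1 - (j + 1) = tf - j := by omega
      rw [ht]
      simp [List.append_assoc]
    · rw [pvStockA, if_neg hj]
      have h0 : tf + 1 - j = 0 := by omega
      rw [h0]
      simp

-- turning A's in-place write at index t = bx.length into an appended block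
theorem pvSetBlock (bx : List Int) (v : Int) (t tf n : Nat) (hbx : bx.length = t)
    (h1 : t < n) (h2 : t ≤ tf) (h3 : tf + 1 ≤ n) :
    (bx ++ List.replicate (n - t) 0).set t v =
      (bx ++ [v] ++ List.replicate (tf - t) 0) ++ List.replicate (n - (tf + 1)) 0 := by
  rw [List.set_append_right _ _ (by omega : bx.length ≤ t)]
  have hz : t - bx.length = 0 := by omega
  rw [hz]
  have hnt : n - t = (n - t - 1) + 1 := by omega
  rw [hnt, List.replicate_succ, List.set_cons_zero]
  have hsplit : n - t - 1 = (tf - t) + (n - (tf + 1)) := by omega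
  rw [hsplit, List.replicate_add]
  simp [List.append_assoc]

theorem pvIfRow_tail (t : Nat) (a : Int) :
    ∀ (k s : Nat), t < s →
    (List.range' s k).map (fun j => if j = t then a else (0 : Int)) = List.replicate k 0 := by
  intro k
  induction k with
  | zero => intro s _; simp
  | succ k ih =>
    intro s hs
    rw [List.range'_succ, List.map_cons, ih (s + 1) (by omega)]
    rw [if_neg (by omega)]
    simp [List.replicate_succ]

theorem pvXRow_eq (D : List Int) (t tf : Nat) (h : t ≤ tf) :
    pvXRow D (t, tf) = [D.getD (tf + 1) 0 - D.getD t 0] ++ List.replicate (tf - t) 0 := by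
  unfold pvXRow
  simp only
  have hr : tf + 1 - t = (tf - t) + 1 := by omega
  rw [hr, List.range'_succ, List.map_cons, if_pos rfl, pvIfRow_tail t _ _ (t + 1) (by omega)]
  simp

theorem pvYRow_eq (t tf : Nat) (h : t ≤ tf) :
    pvYRow (t, tf) = [(1 : Int)] ++ List.replicate (tf - t) 0 := by
  unfold pvYRow
  simp only
  have hr : tf + 1 - t = (tf - t) + 1 := by omega
  rw [hr, List.range'_succ, List.map_cons, if_pos rfl, pvIfRow_tail t _ _ (t + 1) (by omega)]
  simp

theorem pvBlocks_acc (D f h_ : List Int) (n : Nat) :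
    ∀ (fuel t : Nat) (acc : List (Nat × Nat)),
    pvBlocks D f h_ n fuel t acc = acc ++ pvBlocks D f h_ n fuel t [] := by
  intro fuel
  induction fuel with
  | zero => intro t acc; rw [pvBlocks, pvBlocks]; simp
  | succ fuel ih =>
    intro t acc
    rw [pvBlocks, pvBlocks]
    by_cases ht : t < n
    · rw [if_pos ht, if_pos ht]
      simp only
      rw [ih _ (acc ++ [(t, pvFindJ D f h_ n t n (t + 1) 0 - 1)]),
        ih _ ([] ++ [(t, pvFindJ D f h_ n t n (t + 1) 0 - 1)])]
      simp
    · rw [if_neg ht, if_neg ht]; simp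

-- outer-loop invariant: A's patched arrays equal the prefix built so far plus the
-- flatMap over the remaining blocks, with an untouched replicate-0 tail
theorem pvOuter_eq (d p f h_ : List Int) (n : Nat) (hn : n = d.length) :
    ∀ (fuel t : Nat) (bx bs by_ : List Int),
    n - t ≤ fuel → 1 ≤ t → t ≤ n →
    bx.length = t → bs.length = t → by_.length = t →
    pvOuterA d p f h_ n fuel t (bx ++ List.replicate (n - t) 0)
        (bs ++ List.replicate (n - t) 0) (by_ ++ List.replicate (n - t) 0) =
      (bx ++ (pvBlocks (pvPref d) f h_ n fuel t []).flatMap (pvXRow (pvPref d)),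
       bs ++ (pvBlocks (pvPref d) f h_ n fuel t []).flatMap (pvSRow (pvPref d)),
       by_ ++ (pvBlocks (pvPref d) f h_ n fuel t []).flatMap pvYRow) := by
  intro fuel
  induction fuel with
  | zero =>
    intro t bx bs by_ hf h1 h2 hbx hbs hby
    have h0 : n - t = 0 := by omega
    rw [pvOuterA, pvBlocks, h0]
    simp
  | succ fuel ih =>
    intro t bx bs by_ hf h1 h2 hbx hbs hby
    by_cases ht : t < n
    case neg =>
      have h0 : n - t = 0 := by omega
      rw [pvOuterA, if_neg ht, pvBlocks, if_neg ht, h0]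
      simp
    case pos =>
      rw [pvOuterA, if_pos ht, pvBlocks, if_pos ht]
      simp only
      set j' := pvFindJ (pvPref d) f h_ n t n (t + 1) 0 with hj'
      have hbnd := pvFindJ_bounds (pvPref d) f h_ n t n (t + 1) 0 (by omega)
      rw [← hj'] at hbnd
      set tf := j' - 1 with htf
      have htf1 : tf + 1 = j' := by omega
      have httf : t ≤ tf := by omega
      have htfn : tf + 1 ≤ n := by omega
      have hin : pvInnerA d f h_ n t n (t + 1) (PySem.List.pyGetD d (t : Int) 0) 0 t
          = (pvSumD d t j', tf) := by
        have h := pvInner_eq d f h_ n t hn (by omega) n (t + 1) 0 (Nat.le_succ t)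
        rw [Nat.add_sub_cancel] at h
        rw [← pvSumD_single d t, h]
      rw [hin]
      simp only
      -- the produced block demand as D-differences
      have hval : pvSumD d t j' = (pvPref d).getD (tf + 1) 0 - (pvPref d).getD t 0 := by
        rw [pvPref_getD d (tf + 1) (by omega), pvPref_getD d t (by omega), htf1,
          pvSumD_take d t j' (by omega)]
      -- x and y arrays
      have hx : (bx ++ List.replicate (n - t) 0).set t (pvSumD d t j')
          = (bx ++ pvXRow (pvPref d) (t, tf)) ++ List.replicate (n - (tf + 1)) 0 := by
        rw [pvSetBlock bx _ t tf n hbx ht httf htfn, pvXRow_eq _ _ _ httf, hval]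
        simp [List.append_assoc]
      have hy : (by_ ++ List.replicate (n - t) 0).set t 1
          = (by_ ++ pvYRow (t, tf)) ++ List.replicate (n - (tf + 1)) 0 := by
        rw [pvSetBlock by_ _ t tf n hby ht httf htfn, pvYRow_eq _ _ httf]
        simp [List.append_assoc]
      -- s array
      have hs : pvStockA d tf (tf + 1) t (pvSumD d t j') (bs ++ List.replicate (n - t) 0)
          = (bs ++ pvSRow (pvPref d) (t, tf)) ++ List.replicate (n - (tf + 1)) 0 := by
        have h := pvStock_eq d tf (tf + 1) t (n - t) bs (by omega) hbs (by omega)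
        rw [htf1] at h ⊢
        rw [h]
        have hrow : (List.range' t (tf + 1 - t)).map (fun k => max (pvSumD d (k + 1) (tf + 1)) 0)
            = pvSRow (pvPref d) (t, tf) := by
          unfold pvSRow
          refine List.map_congr_left ?_
          intro k hk
          rw [List.mem_range'] at hk
          have hk1 : k + 1 ≤ tf + 1 := by omega
          rw [pvSumD_take d (k + 1) (tf + 1) hk1,
            pvPref_getD d (tf + 1) (by omega), pvPref_getD d (k + 1) (by omega)]
        rw [htf1] at hrow
        rw [hrow]
        congr 2
        omega
      rw [hx, hy, hs]
      simp only [List.nil_append]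
      rw [pvBlocks_acc (pvPref d) f h_ n fuel j' [(t, tf)], ← htf1]
      simp only [List.flatMap_append, List.flatMap_cons, List.flatMap_nil, List.append_nil]
      rw [← List.append_assoc bx, ← List.append_assoc bs, ← List.append_assoc by_]
      exact ih (tf + 1) (bx ++ pvXRow (pvPref d) (t, tf)) (bs ++ pvSRow (pvPref d) (t, tf))
        (by_ ++ pvYRow (t, tf)) (by omega) (by omega) (by omega)
        (by unfold pvXRow; simp [hbx]; omega)
        (by unfold pvSRow; simp [hbs]; omega)
        (by unfold pvYRow; simp [hby]; omega)

-- ===== VERDICT (by name: the statement is the Claim_ definition above) =====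
theorem balance_heuristic_spec : Claim_equal_balance_heuristic := by
  intro d p f h_ _ _
  unfold Spec_balance_heuristic
  simp only [balance_heuristic, balance_heuristic_alt]
  by_cases hn : d.length = 0
  · rw [if_pos hn, hn]
    rw [pvOuterA]
    norm_num
    unfold pvCost
    rw [PySem.List.pyRange_one_eq_nil (by norm_num)]
    simp
  · rw [if_neg hn]
    have hrep : List.replicate d.length (0 : Int) =
        [0] ++ List.replicate (d.length - 1) 0 := by
      cases h : d.length with
      | zero => exact absurd h hn
      | succ k => simp [List.replicate_succ]
    have hmain := pvOuter_eq d p f h_ d.length rfl d.length 1 [0] [0] [0]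
      (by omega) (by omega) (by omega) (by simp) (by simp) (by simp)
    rw [hrep, hmain]
    simp
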